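-- pv_equiv track=rewrite | github.com/Bigenlight/Doosan_Robotics_ROS2_demo | f_2/f_2/test.py | create_ans_list_with_n
-- ===== SOURCE A (Python) =====
-- from collections import Counter
--
-- def create_ans_list_with_n(data):
--     """
--     주어진 data 딕셔너리의 값들을 기반으로 정답 배열(ans)을 생성합니다.
--     s, m, l의 개수를 세고, 's', 'm', 'l' 순서로 쌓은 뒤, 일정 간격(n_interval)마다 'n'을 삽입합니다.
--     """
--     counter = Counter(data.values())
--     ans = []
--     order = ['s', 'm', 'l']
--
--     for item in order:
--         ans.extend([item] * counter.get(item, 0))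
--
--     n_interval = 5
--     current_index = n_interval - 1
--     while current_index < len(ans):
--         ans.insert(current_index, 'n')
--         current_index += n_interval + 1
--
--     return ans
-- ===== SOURCE B (Python) =====
-- def create_ans_list_with_n(data):
--     counts = {'s': 0, 'm': 0, 'l': 0}
--     for v in data.values():
--         if v in counts:
--             counts[v] += 1
--     ans = ['s'] * counts['s'] + ['m'] * counts['m'] + ['l'] * counts['l']
--     res = ans[:4]
--     i = 4
--     while i < len(ans):
--         res.append('n')
--         res.extend(ans[i:i+5])
--         i += 5
--     return res
-- ===== Notes on version B (the rewrite author's own statement) =====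
-- stated objective: alternative
-- what changed: Replaces A's Counter plus repeated in-place list.insert of 'n' (each shifting the tail) by a guarded three-key counting pass and a fresh chunked build of the output (first 4 items, then 'n' followed by up to 5 items per chunk); measured runtimes are comparable.
import Mathlib
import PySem

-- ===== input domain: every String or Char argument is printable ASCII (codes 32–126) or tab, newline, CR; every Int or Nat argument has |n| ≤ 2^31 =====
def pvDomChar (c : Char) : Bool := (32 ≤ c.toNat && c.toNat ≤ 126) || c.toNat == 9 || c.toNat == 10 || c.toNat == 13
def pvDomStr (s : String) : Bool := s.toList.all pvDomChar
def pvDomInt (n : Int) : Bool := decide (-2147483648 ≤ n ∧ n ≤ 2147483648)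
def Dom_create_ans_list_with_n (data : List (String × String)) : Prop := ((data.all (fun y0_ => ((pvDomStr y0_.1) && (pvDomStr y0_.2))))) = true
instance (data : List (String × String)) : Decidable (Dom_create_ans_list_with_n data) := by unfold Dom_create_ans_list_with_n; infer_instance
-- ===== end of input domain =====

-- B replaces A's repeated in-place list.insert by a single three-key counting pass and a
-- chunked, front-to-back build of the result (first 4 items, then 'n' + up to 5 items each).

-- ===== PORT A =====
-- while current_index < len(ans): ans.insert(current_index, 'n'); current_index += 6
def pvInsLoopA (ans : List String) (i : Nat) : List String :=
  if h : i < ans.length then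
    pvInsLoopA (PySem.List.insert ans (i : Int) "n") (i + 6)
  else ans
termination_by ans.length - i
decreasing_by simp only [PySem.List.length_insert]; omega

def create_ans_list_with_n (data : List (String × String)) : List String :=
  let counter := PySem.Dict.counter ((PySem.Dict.ofList data).values)
  let ans : List String :=
    ["s", "m", "l"].foldl
      (fun ans item => ans ++ PySem.List.pyRepeat [item] (counter.getD item 0)) []
  pvInsLoopA ans 4

-- ===== PORT B =====
-- while i < len(ans): res.append('n'); res.extend(ans[i:i+5]); i += 5   — built on the remaining suffix
def pvChunkB (rest : List String) : List String :=
  if _h : rest = [] then []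
  else "n" :: (rest.take 5 ++ pvChunkB (rest.drop 5))
termination_by rest.length
decreasing_by
  simp only [List.length_drop]
  have := List.length_pos_of_ne_nil _h
  omega

def create_ans_list_with_n_alt (data : List (String × String)) : List String :=
  let counts := ((PySem.Dict.ofList data).values).foldl
      (fun (d : PySem.Dict String Int) v =>
        if d.contains v then d.modify v 0 (· + 1) else d)
      (((PySem.Dict.empty.insert "s" 0).insert "m" 0).insert "l" 0)
  let ans : List String :=
    List.replicate (counts.getD "s" 0).toNat "s"
      ++ List.replicate (counts.getD "m" 0).toNat "m"
      ++ List.replicate (counts.getD "l" 0).toNat "l"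
  PySem.List.slice ans none (some 4) ++ pvChunkB (ans.drop 4)

-- ===== PRECONDITION & SPEC =====
def Spec_create_ans_list_with_n (data : List (String × String)) (out : List String) : Prop := out = create_ans_list_with_n_alt data
instance (data : List (String × String)) (out : List String) : Decidable (Spec_create_ans_list_with_n data out) := by unfold Spec_create_ans_list_with_n; infer_instance

-- ===== CLAIM (what is proved, stated in full; the proofs are below) =====
def Claim_equal_create_ans_list_with_n : Prop := ∀ (data : List (String × String)), Dom_create_ans_list_with_n data → Spec_create_ans_list_with_n data (create_ans_list_with_n data)

-- ===== LEMMAS AND PROOFS =====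

-- the literal initial dict of B's counting pass, evaluated
theorem pv_init_cs : ((((PySem.Dict.empty.insert "s" 0).insert "m" 0).insert "l" 0) : PySem.Dict String Int).contains "s" = true := by decide
theorem pv_init_cm : ((((PySem.Dict.empty.insert "s" 0).insert "m" 0).insert "l" 0) : PySem.Dict String Int).contains "m" = true := by decide
theorem pv_init_s : ((((PySem.Dict.empty.insert "s" 0).insert "m" 0).insert "l" 0) : PySem.Dict String Int).getD "s" 0 = 0 := by decide
theorem pv_init_m : ((((PySem.Dict.empty.insert "s" 0).insert "m" 0).insert "l" 0) : PySem.Dict String Int).getD "m" 0 = 0 := by decide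

-- B's guarded counting fold, characterised: keys absent from d are never added, present keys count occurrences.
theorem pv_foldl_guard_count (l : List String) (d : PySem.Dict String Int) (k : String) :
    (l.foldl (fun d v => if d.contains v then d.modify v 0 (· + 1) else d) d).getD k 0
      = d.getD k 0 + (if d.contains k then (l.count k : Int) else 0) := by
  induction l generalizing d with
  | nil => simp
  | cons v tl ih =>
    simp only [List.foldl_cons]
    by_cases hv : d.contains v = true
    · rw [if_pos hv, ih, PySem.Dict.getD_modify, PySem.Dict.contains_modify]
      by_cases hk : k = v
      · subst hk
        simp [hv]
        ring
      · simp [hk, Ne.symm hk]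
    · rw [if_neg hv, ih]
      by_cases hk : k = v
      · subst hk; simp [hv]
      · simp [Ne.symm hk]

-- the core shape lemma: A's insert loop, started at the length of the prefix, equals prefix ++ chunks
theorem pv_insLoop_eq (n : Nat) : ∀ (rest pre : List String), rest.length ≤ n →
    pvInsLoopA (pre ++ rest) pre.length = pre ++ pvChunkB rest := by
  induction n with
  | zero =>
    intro rest pre h
    have : rest = [] := List.eq_nil_of_length_eq_zero (Nat.le_zero.mp h)
    subst this
    rw [pvInsLoopA.eq_def, pvChunkB.eq_def]
    simp
  | succ n ih =>
    intro rest pre h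
    by_cases hne : rest = []
    · subst hne
      rw [pvInsLoopA.eq_def, pvChunkB.eq_def]
      simp
    · have hlt : pre.length < (pre ++ rest).length := by
        simp [List.length_append]
        exact List.length_pos_of_ne_nil hne
      rw [pvInsLoopA.eq_def, dif_pos hlt]
      have hins : PySem.List.insert (pre ++ rest) (pre.length : Int) "n"
          = pre ++ "n" :: rest := by
        rw [PySem.List.insert_natCast _ _ _ (by simp)]
        simp
      rw [hins]
      conv_rhs => rw [pvChunkB.eq_def]
      rw [dif_neg hne]
      by_cases h5 : 5 ≤ rest.length
      · -- full chunk: recurse with prefix extended by 'n' and the next 5 items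
        have hsplit : pre ++ "n" :: rest
            = (pre ++ "n" :: rest.take 5) ++ rest.drop 5 := by
          simp
        have hlen : (pre ++ "n" :: rest.take 5).length = pre.length + 6 := by
          simp [List.length_take]
          omega
        rw [hsplit, ← hlen, ih (rest.drop 5) (pre ++ "n" :: rest.take 5)
              (by simp only [List.length_drop]; omega)]
        simp
      · -- short tail: the next index is past the end, loop stops
        rw [pvInsLoopA.eq_def, dif_neg (by simp; omega)]
        have h1 : rest.take 5 = rest := List.take_of_length_le (by omega)
        have h2 : rest.drop 5 = [] := List.drop_eq_nil_of_le (by omega)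
        rw [h1, h2, pvChunkB.eq_def]
        simp

theorem pv_insLoop_main (ans : List String) :
    pvInsLoopA ans 4 = ans.take 4 ++ pvChunkB (ans.drop 4) := by
  by_cases h : 4 ≤ ans.length
  · have h4 : (ans.take 4).length = 4 := by simp [List.length_take]; omega
    calc pvInsLoopA ans 4
        = pvInsLoopA (ans.take 4 ++ ans.drop 4) (ans.take 4).length := by
          rw [h4, List.take_append_drop]
      _ = ans.take 4 ++ pvChunkB (ans.drop 4) :=
          pv_insLoop_eq (ans.drop 4).length _ _ le_rfl
  · have hd : ans.drop 4 = [] := List.drop_eq_nil_of_le (by omega)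
    have ht : ans.take 4 = ans := List.take_of_length_le (by omega)
    rw [pvInsLoopA.eq_def, dif_neg (by omega), hd, ht, pvChunkB.eq_def]
    simp

-- ===== VERDICT (by name: the statement is the Claim_ definition above) =====
theorem create_ans_list_with_n_spec : Claim_equal_create_ans_list_with_n := by
  intro data _
  unfold Spec_create_ans_list_with_n create_ans_list_with_n create_ans_list_with_n_alt
  dsimp only
  rw [pv_insLoop_main, PySem.List.slice_to _ (by norm_num)]
  simp [pv_foldl_guard_count, List.foldl, PySem.Dict.getD_counter,
    PySem.List.pyRepeat_singleton, pv_init_cs, pv_init_cm, pv_init_s, pv_init_m]
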